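-- pv_equiv track=rewrite | github.com/kai3n/Daily-commit-project | Sanghyun/week14/과일 장수.py | solution
-- ===== SOURCE A (Python) =====
-- def solution(k, m, score):
--     # 최고이익 반환
--     answer = 0
--     # 사과 등급을 내림차순으로 정렬
--     score = sorted(score, reverse = True)
--
--     # m개가 1개의 상자에 들어가므로 건너뛰면서 반복
--     for i in range(0, len(score), m):
--         # m개 사과등급 저장
--         temp = score[i:i+m]
--         # 상자안에 갯수가 맞다면 최고이익 계산
--         if len(temp) == m:
--             answer += min(temp) * m
--     # 최고이익 반환
--     return answer
-- ===== SOURCE B (Python) =====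
-- def solution(k, m, score):
--     # Bucket the grades in a counter; walk the distinct grades from highest to
--     # lowest, tracking how many apples have been taken so far.  A grade v is the
--     # minimum of a full box exactly when a multiple of m falls inside its run of
--     # ranks, so it contributes v times the number of such multiples:
--     # (seen+cnt[v])//m - seen//m.  No per-box slicing, duplicates handled in bulk.
--     cnt = {}
--     for x in score:
--         cnt[x] = cnt.get(x, 0) + 1
--     total = 0
--     seen = 0
--     for v in sorted(cnt, reverse=True):
--         new = seen + cnt[v]
--         total += v * (new // m - seen // m)
--         seen = new
--     return m * total
-- ===== Notes on version B (the rewrite author's own statement) =====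
-- stated objective: alternative
-- what changed: B replaces A's sort-descending + per-box slice/min loop by a counting approach: build a frequency dict, walk only the distinct grades from highest to lowest, and for each grade add v times the number of box-minimum ranks (multiples of m) falling inside its run, computed arithmetically as (seen+cnt[v])//m - seen//m; no full-list sort over duplicates, no slicing, no min().
-- outside the precondition, e.g. on solution(0, -2, [1, 2, 3]): A returns 0, B returns 8
import Mathlib
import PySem

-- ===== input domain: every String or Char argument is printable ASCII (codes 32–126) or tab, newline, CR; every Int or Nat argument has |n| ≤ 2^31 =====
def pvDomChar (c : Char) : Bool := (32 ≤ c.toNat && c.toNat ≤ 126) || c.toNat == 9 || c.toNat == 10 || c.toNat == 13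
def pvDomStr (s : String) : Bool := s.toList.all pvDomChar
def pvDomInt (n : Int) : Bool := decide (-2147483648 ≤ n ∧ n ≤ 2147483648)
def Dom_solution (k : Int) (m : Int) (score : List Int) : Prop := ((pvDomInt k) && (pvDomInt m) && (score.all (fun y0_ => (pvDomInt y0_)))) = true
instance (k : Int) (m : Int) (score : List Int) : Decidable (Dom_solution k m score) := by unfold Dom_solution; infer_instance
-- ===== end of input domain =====

-- B replaces A's sort-descending + per-box slice/min loop by a frequency dict over the
-- distinct grades, walked from highest to lowest, counting box-minimum ranks arithmetically
-- per grade (objective: alternative).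

-- ===== PORT A =====
def solution (k : Int) (m : Int) (score : List Int) : Int :=
  let s := PySem.List.sorted score (fun x => x) true
  (PySem.List.pyRange 0 (s.length : Int) m).foldl
    (fun answer i =>
      let temp := PySem.List.slice s (some i) (some (i + m))
      if (temp.length : Int) = m then answer + PySem.List.minD temp (fun x => x) 0 * m
      else answer) 0

-- ===== PORT B =====
def solution_alt (k : Int) (m : Int) (score : List Int) : Int :=
  let cnt := score.foldl (fun d x => PySem.Dict.insert d x (PySem.Dict.getD d x 0 + 1))
    (PySem.Dict.empty : PySem.Dict Int Int)
  let ks := PySem.List.sorted (PySem.Dict.keys cnt) (fun x => x) true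
  let p := ks.foldl
    (fun (p : Int × Int) v =>
      let nw := p.2 + PySem.Dict.getD cnt v 0
      (p.1 + v * (PySem.Int.floordiv nw m - PySem.Int.floordiv p.2 m), nw)) (0, 0)
  m * p.1

-- ===== PRECONDITION & SPEC =====
-- Pre_ restricts to the natural domain 0 < m (a positive box size): at m = 0 Python A raises
-- ValueError (range step 0) and B raises ZeroDivisionError; for m < 0 A's constant 0 is only an
-- artefact of range's emptiness on a negative step while B's block arithmetic returns a
-- meaningless value, so negative box sizes are excluded as outside the task's domain.
def Pre_solution (k : Int) (m : Int) (score : List Int) : Prop := 0 < m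
instance (k : Int) (m : Int) (score : List Int) : Decidable (Pre_solution k m score) := by unfold Pre_solution; infer_instance
def pvWitness_solution : Int × Int × List Int := (0, 2, [1, 2, 3])

def Spec_solution (k : Int) (m : Int) (score : List Int) (out : Int) : Prop := out = solution_alt k m score
instance (k : Int) (m : Int) (score : List Int) (out : Int) : Decidable (Spec_solution k m score out) := by unfold Spec_solution; infer_instance

-- ===== CLAIM (what is proved, stated in full; the proofs are below) =====
def Claim_equal_solution : Prop := ∀ (k : Int) (m : Int) (score : List Int), Dom_solution k m score → Pre_solution k m score → Spec_solution k m score (solution k m score)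

-- ===== LEMMAS AND PROOFS =====

-- descending sort (of Ints by identity) is the reverse of the ascending sort
lemma sorted_desc_eq_reverse_asc (xs : List Int) :
    PySem.List.sorted xs (fun x => x) true = (PySem.List.sorted xs (fun x => x) false).reverse := by
  apply List.Perm.eq_of_pairwise (le := fun a b : Int => b ≤ a)
  · intro a b _ _ h1 h2; omega
  · have := PySem.List.sorted_pairwise_rev (xs := xs) (key := fun x => x)
    simpa using this
  · rw [List.pairwise_reverse]
    have := PySem.List.sorted_pairwise (xs := xs) (key := fun x => x)
    simpa using this
  · exact (PySem.List.sorted_perm xs (fun x => x) true).trans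
      ((PySem.List.sorted_perm xs (fun x => x) false).symm.trans
        (List.reverse_perm _).symm)

-- a foldl that conditionally adds is init + a sum
lemma foldl_ite_add_sum {α : Type} (C : α → Prop) [DecidablePred C] (h : α → Int)
    (l : List α) (init : Int) :
    l.foldl (fun acc x => if C x then acc + h x else acc) init
      = init + (l.map (fun x => if C x then h x else 0)).sum := by
  induction l generalizing init with
  | nil => simp
  | cons a t ih => simp only [List.foldl_cons, List.map_cons, List.sum_cons, ih]; split_ifs <;> ring

lemma list_sum_map_range (f : Nat → Int) (n : Nat) :
    ((List.range n).map f).sum = ∑ k ∈ Finset.range n, f k := by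
  induction n with
  | zero => simp
  | succ n ih => simp [List.range_succ, Finset.sum_range_succ, ih]

-- Python min of a nonempty weakly descending Int list is its last element
lemma foldl_min_desc (t : List Int) (x : Int)
    (hp : (x :: t).Pairwise (fun a b => b ≤ a)) :
    t.foldl min x = (x :: t).getLast (List.cons_ne_nil x t) := by
  induction t generalizing x with
  | nil => simp
  | cons y t' ih =>
    have hxy : y ≤ x := (List.pairwise_cons.mp hp).1 y (by simp)
    have : min x y = y := by omega
    simp only [List.foldl_cons, this]
    rw [ih y hp.of_cons]
    simp [List.getLast_cons]

lemma minD_desc (l : List Int) (hl : l ≠ []) (hp : l.Pairwise (fun a b => b ≤ a)) :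
    PySem.List.minD l (fun x => x) 0 = l.getLast hl := by
  cases l with
  | nil => exact absurd rfl hl
  | cons x t =>
    unfold PySem.List.minD
    rw [PySem.List.min?_id_cons, Option.getD_some, foldl_min_desc t x hp]

lemma getLast_eq_getD (l : List Int) (hl : l ≠ []) :
    l.getLast hl = l.getD (l.length - 1) 0 := by
  rw [List.getLast_eq_getElem, List.getD_eq_getElem _ _ (by
    have := List.length_pos_iff.mpr hl
    omega)]

-- A's loop, characterised as a sum over the ascending sort (a := sorted ascending)
lemma A_sum (a : List Int) (m : Int) (hm : 0 < m) (hpa : a.Pairwise (· ≤ ·)) :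
    (PySem.List.pyRange 0 (a.reverse.length : Int) m).foldl
      (fun answer i =>
        let temp := PySem.List.slice a.reverse (some i) (some (i + m))
        if (temp.length : Int) = m then answer + PySem.List.minD temp (fun x => x) 0 * m
        else answer) 0
    = m * ∑ k ∈ Finset.range (a.length / m.toNat), a.getD (a.length % m.toNat + m.toNat * k) 0 := by
  set N := a.length with hN
  set mt := m.toNat with hmtdef
  have hmt : (mt : Int) = m := Int.toNat_of_nonneg hm.le
  have hmt0 : 0 < mt := by omega
  set q := N / mt with hq
  set rr := N % mt with hrr
  have hNq : N = mt * q + rr := (Nat.div_add_mod N mt).symm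
  have hrlt : rr < mt := Nat.mod_lt _ hmt0
  have hrev : a.reverse.length = N := by rw [List.length_reverse]
  rw [hrev, PySem.List.pyRange_of_pos _ _ hm]
  simp only [List.foldl_map]
  rw [foldl_ite_add_sum, list_sum_map_range, zero_add]
  have hterm : ∀ k : Nat,
      (if ((PySem.List.slice a.reverse (some (0 + m * (k : Int)))
              (some (0 + m * (k : Int) + m))).length : Int) = m then
        PySem.List.minD (PySem.List.slice a.reverse (some (0 + m * (k : Int)))
              (some (0 + m * (k : Int) + m))) (fun x => x) 0 * m
      else 0)
      = if k < q then a.getD (rr + mt * (q - 1 - k)) 0 * m else 0 := by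
    intro k
    have hidx1 : (0 : Int) + m * (k : Int) = ((mt * k : Nat) : Int) := by
      push_cast [← hmt]; ring
    have hidx2 : ((mt * k : Nat) : Int) + m = ((mt * k + mt : Nat) : Int) := by
      push_cast [← hmt]; ring
    rw [hidx1, hidx2, PySem.List.slice_natCast]
    have hsub : mt * k + mt - mt * k = mt := by omega
    rw [hsub]
    set j := mt * k with hj
    have hlen : ((a.reverse.drop j).take mt).length = min mt (N - j) := by
      simp [hrev]
    by_cases hfull : j + mt ≤ N
    · have hC : (((a.reverse.drop j).take mt).length : Int) = m := by
        rw [hlen, ← hmt]; congr 1; omega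
      have hkq : k < q := by
        have h1 : (k + 1) * mt ≤ N := by
          have : (k + 1) * mt = j + mt := by rw [hj]; ring
          omega
        have := (Nat.le_div_iff_mul_le hmt0 (x := k + 1) (y := N)).mpr h1
        omega
      rw [if_pos hC, if_pos hkq]
      congr 1
      have htl : ((a.reverse.drop j).take mt).length = mt := by rw [hlen]; omega
      have hne : (a.reverse.drop j).take mt ≠ [] := by
        apply List.ne_nil_of_length_pos; omega
      have hpw : ((a.reverse.drop j).take mt).Pairwise (fun x y => y ≤ x) := by
        refine List.Pairwise.sublist ((List.take_sublist _ _).trans (List.drop_sublist _ _)) ?_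
        exact List.pairwise_reverse.mpr hpa
      rw [minD_desc _ hne hpw, getLast_eq_getD, htl]
      have hin : mt - 1 < ((a.reverse.drop j).take mt).length := by omega
      rw [List.getD_eq_getElem _ _ hin, List.getElem_take, List.getElem_drop,
          List.getElem_reverse]
      have hidx : a.length - 1 - (j + (mt - 1)) = rr + mt * (q - 1 - k) := by
        have hx : mt * (q - 1 - k) + mt * k + mt = mt * q := by
          have h5 : (q - 1 - k) + k + 1 = q := by omega
          calc mt * (q - 1 - k) + mt * k + mt = mt * ((q - 1 - k) + k + 1) := by ring
            _ = mt * q := by rw [h5]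
        omega
      rw [← List.getD_eq_getElem a 0 (by omega), hidx]
    · have hC : ¬ ((((a.reverse.drop j).take mt).length : Int) = m) := by
        rw [hlen, ← hmt]
        intro hcontra
        have : min mt (N - j) = mt := by exact_mod_cast hcontra
        omega
      have hkq : ¬ k < q := by
        intro hk
        have h1 : (k + 1) ≤ q := hk
        have h2 : (k + 1) * mt ≤ N := (Nat.le_div_iff_mul_le hmt0).mp h1
        have : (k + 1) * mt = j + mt := by rw [hj]; ring
        omega
      rw [if_neg hC, if_neg hkq]
  calc ∑ k ∈ Finset.range (if (0 : Int) < (N : Int) then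
          (((N : Int) - 0 + m - 1) / m).toNat else 0),
        (if ((PySem.List.slice a.reverse (some (0 + m * (k : Int)))
              (some (0 + m * (k : Int) + m))).length : Int) = m then
          PySem.List.minD (PySem.List.slice a.reverse (some (0 + m * (k : Int)))
              (some (0 + m * (k : Int) + m))) (fun x => x) 0 * m
        else 0)
      = ∑ k ∈ Finset.range (if (0 : Int) < (N : Int) then
          (((N : Int) - 0 + m - 1) / m).toNat else 0),
          (if k < q then a.getD (rr + mt * (q - 1 - k)) 0 * m else 0) := by
        exact Finset.sum_congr rfl (fun k _ => hterm k)
    _ = ∑ k ∈ Finset.range q, (if k < q then a.getD (rr + mt * (q - 1 - k)) 0 * m else 0) := by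
        have hqle : q ≤ (if (0 : Int) < (N : Int) then
            (((N : Int) - 0 + m - 1) / m).toNat else 0) := by
          by_cases hN0 : (0 : Int) < (N : Int)
          · rw [if_pos hN0]
            have h1 : ((mt * q : Nat) : Int) ≤ (N : Int) := by
              exact_mod_cast (by omega : mt * q ≤ N)
            have h2 : (q : Int) * m = ((mt * q : Nat) : Int) := by
              push_cast [← hmt]; ring
            have h3 : (q : Int) ≤ ((N : Int) - 0 + m - 1) / m := by
              rw [Int.le_ediv_iff_mul_le hm]; omega
            have h4 := Int.toNat_le_toNat h3
            simpa using h4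
          · rw [if_neg hN0]
            have : N = 0 := by omega
            have : q = 0 := by rw [hq, this]; simp
            omega
        exact (Finset.sum_subset (by intro x hx; simp only [Finset.mem_range] at hx ⊢; omega)
          (fun x _ hx => if_neg (by simpa using hx))).symm
    _ = ∑ k ∈ Finset.range q, a.getD (rr + mt * (q - 1 - k)) 0 * m := by
        exact Finset.sum_congr rfl (fun k hk => if_pos (Finset.mem_range.mp hk))
    _ = (∑ k ∈ Finset.range q, a.getD (rr + mt * (q - 1 - k)) 0) * m := by
        rw [Finset.sum_mul]
    _ = (∑ k ∈ Finset.range q, a.getD (rr + mt * k) 0) * m := by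
        rw [Finset.sum_range_reflect (fun j => a.getD (rr + mt * j) 0) q]
    _ = m * ∑ k ∈ Finset.range q, a.getD (rr + mt * k) 0 := by ring

-- B-side: counting multiples of mt in a block of ranks
lemma count_mult (mt s c : Nat) :
    (s + c) / mt = s / mt + ∑ j ∈ Finset.range c, (if mt ∣ s + j + 1 then 1 else 0) := by
  induction c with
  | zero => simp
  | succ c ih =>
    have h1 : s + (c + 1) = (s + c) + 1 := by omega
    rw [h1, Nat.succ_div, ih, Finset.sum_range_succ]
    omega

-- one grade's fold step equals the sum of its rank contributions
lemma block_term (m : Int) (mt : Nat) (hmt : (mt : Int) = m) (v : Int) (s c : Nat) :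
    v * (PySem.Int.floordiv ((s + c : Nat) : Int) m - PySem.Int.floordiv ((s : Nat) : Int) m)
      = ∑ j ∈ Finset.range c, (if mt ∣ s + j + 1 then v else 0) := by
  rw [← hmt, PySem.Int.floordiv_natCast, PySem.Int.floordiv_natCast, count_mult mt s c]
  have : ∑ j ∈ Finset.range c, (if mt ∣ s + j + 1 then v else 0)
      = v * ∑ j ∈ Finset.range c, (if mt ∣ s + j + 1 then (1 : Int) else 0) := by
    rw [Finset.mul_sum]
    exact Finset.sum_congr rfl (fun j _ => by split_ifs <;> ring)
  rw [this]
  have hcast : ((s / mt + ∑ j ∈ Finset.range c, (if mt ∣ s + j + 1 then 1 else 0) : Nat) : Int)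
      = ((s / mt : Nat) : Int) + ∑ j ∈ Finset.range c, (if mt ∣ s + j + 1 then (1 : Int) else 0) := by
    push_cast
    rfl
  rw [hcast]
  ring

-- the whole fold over the distinct grades equals the rank-filtered sum over the flattened list
lemma B_fold (L : List Int) (c : Int → Nat) (m : Int) (mt : Nat) (hmt : (mt : Int) = m)
    (t0 : Int) (s : Nat) :
    (L.foldl
      (fun (p : Int × Int) v =>
        (p.1 + v * (PySem.Int.floordiv (p.2 + (c v : Int)) m - PySem.Int.floordiv p.2 m),
         p.2 + (c v : Int))) (t0, (s : Int))).1
    = t0 + ∑ i ∈ Finset.range (L.flatMap (fun v => List.replicate (c v) v)).length,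
        (if mt ∣ s + i + 1 then (L.flatMap (fun v => List.replicate (c v) v)).getD i 0 else 0) := by
  induction L generalizing t0 s with
  | nil => simp
  | cons v L' ih =>
    simp only [List.foldl_cons, List.flatMap_cons]
    have hcast : (s : Int) + (c v : Int) = ((s + c v : Nat) : Int) := by push_cast; ring
    rw [hcast, ih]
    have hlen : (List.replicate (c v) v ++ L'.flatMap (fun v => List.replicate (c v) v)).length
        = c v + (L'.flatMap (fun v => List.replicate (c v) v)).length := by simp
    rw [hlen, Finset.sum_range_add]
    have hfirst : ∑ i ∈ Finset.range (c v),
        (if mt ∣ s + i + 1 then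
          (List.replicate (c v) v ++ L'.flatMap (fun v => List.replicate (c v) v)).getD i 0
        else 0)
        = v * (PySem.Int.floordiv ((s + c v : Nat) : Int) m - PySem.Int.floordiv ((s : Nat) : Int) m) := by
      rw [block_term m mt hmt v s (c v)]
      refine Finset.sum_congr rfl (fun i hi => ?_)
      have hi' : i < c v := Finset.mem_range.mp hi
      have : (List.replicate (c v) v ++ L'.flatMap (fun v => List.replicate (c v) v)).getD i 0 = v := by
        rw [List.getD_append _ _ _ _ (by simpa using hi'), List.getD_eq_getElem _ _ (by simpa using hi')]
        simp
      rw [this]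
    have hsecond : ∀ i ∈ Finset.range (L'.flatMap (fun v => List.replicate (c v) v)).length,
        (if mt ∣ s + (c v + i) + 1 then
          (List.replicate (c v) v ++ L'.flatMap (fun v => List.replicate (c v) v)).getD (c v + i) 0
        else 0)
        = (if mt ∣ (s + c v) + i + 1 then (L'.flatMap (fun v => List.replicate (c v) v)).getD i 0 else 0) := by
      intro i _
      have h1 : s + (c v + i) + 1 = (s + c v) + i + 1 := by omega
      have h2 : (List.replicate (c v) v ++ L'.flatMap (fun v => List.replicate (c v) v)).getD (c v + i) 0
          = (L'.flatMap (fun v => List.replicate (c v) v)).getD i 0 := by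
        rw [List.getD_append_right _ _ _ _ (by simp)]
        simp
      rw [h1, h2]
    rw [Finset.sum_congr rfl hsecond, hfirst]
    ring

-- count of an element in the flattened replicate list over distinct keys
lemma count_flatMap_replicate (L : List Int) (c : Int → Nat) (hnd : L.Nodup) (w : Int) :
    (L.flatMap (fun v => List.replicate (c v) v)).count w = if w ∈ L then c w else 0 := by
  induction L with
  | nil => simp
  | cons v L' ih =>
    simp only [List.flatMap_cons, List.count_append]
    rw [ih hnd.of_cons]
    by_cases hw : w = v
    · subst hw
      have hnin : w ∉ L' := (List.nodup_cons.mp hnd).1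
      simp [List.count_replicate_self, hnin]
    · have h1 : (List.replicate (c v) v).count w = 0 :=
        List.count_eq_zero.mpr (fun h => hw (List.eq_of_mem_replicate h))
      rw [h1]
      by_cases hm2 : w ∈ L'
      · simp [hm2, List.mem_cons]
      · simp [hm2, List.mem_cons, hw]

-- the flattened replicate list is weakly descending when the keys are strictly descending
lemma flat_pairwise (L : List Int) (c : Int → Nat) (hp : L.Pairwise (fun a b => b < a)) :
    (L.flatMap (fun v => List.replicate (c v) v)).Pairwise (fun a b => b ≤ a) := by
  induction L with
  | nil => simp
  | cons v L' ih =>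
    simp only [List.flatMap_cons]
    rw [List.pairwise_append]
    refine ⟨?_, ih hp.of_cons, ?_⟩
    · exact List.pairwise_replicate.mpr (Or.inr (le_refl v))
    · intro x hx y hy
      have hxv : x = v := List.eq_of_mem_replicate hx
      obtain ⟨u, hu, hyu⟩ := List.mem_flatMap.mp hy
      have hyu' : y = u := List.eq_of_mem_replicate hyu
      have := (List.pairwise_cons.mp hp).1 u hu
      omega

-- the descending sort of score is the concatenation of count-many copies of each distinct
-- grade, grades taken in descending order
lemma flat_eq_sorted_desc (score : List Int) :
    (PySem.List.sorted (PySem.Set.ofList score) (fun x => x) true).flatMap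
      (fun v => List.replicate (score.count v) v)
    = PySem.List.sorted score (fun x => x) true := by
  set L := PySem.List.sorted (PySem.Set.ofList score) (fun x => x) true with hL
  have hperm : L.Perm (PySem.Set.ofList score) := PySem.List.sorted_perm _ _ _
  have hnd : L.Nodup := hperm.nodup_iff.mpr (PySem.Set.nodup_ofList score)
  have hge : L.Pairwise (fun a b => b ≤ a) := by
    have := PySem.List.sorted_pairwise_rev (xs := PySem.Set.ofList score) (key := fun x : Int => x)
    simpa using this
  have hlt : L.Pairwise (fun a b => b < a) := by
    have := hge.and hnd
    exact this.imp (fun h => lt_of_le_of_ne h.1 (Ne.symm h.2))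
  apply List.Perm.eq_of_pairwise (le := fun a b : Int => b ≤ a)
  · intro a b _ _ h1 h2; omega
  · exact flat_pairwise L _ hlt
  · have := PySem.List.sorted_pairwise_rev (xs := score) (key := fun x : Int => x)
    simpa using this
  · refine List.Perm.trans (List.perm_iff_count.mpr (fun w => ?_))
      (PySem.List.sorted_perm score (fun x => x) true).symm
    rw [count_flatMap_replicate L _ hnd w]
    by_cases hw : w ∈ score
    · rw [if_pos (by rw [hL, PySem.List.mem_sorted, PySem.Set.mem_ofList]; exact hw)]
    · rw [if_neg (by rw [hL, PySem.List.mem_sorted, PySem.Set.mem_ofList]; exact hw),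
          List.count_eq_zero.mpr hw]

-- the rank-filtered sum collapses to one term per full box
lemma sum_dvd_blocks (f : Nat → Int) (mt q rr : Nat) (hmt : 0 < mt) (hrr : rr < mt) :
    ∑ i ∈ Finset.range (mt * q + rr), (if mt ∣ i + 1 then f i else 0)
      = ∑ k ∈ Finset.range q, f (mt * k + (mt - 1)) := by
  induction q with
  | zero =>
    simp only [Nat.mul_zero, Nat.zero_add, Finset.range_zero, Finset.sum_empty]
    refine Finset.sum_eq_zero (fun i hi => ?_)
    have hi' : i < rr := Finset.mem_range.mp hi
    rw [if_neg]
    intro hdvd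
    have := Nat.le_of_dvd (by omega) hdvd
    omega
  | succ q ih =>
    have h1 : mt * (q + 1) + rr = (mt * q + rr) + mt := by ring
    rw [h1, Finset.sum_range_add, ih, Finset.sum_range_succ]
    congr 1
    rw [Finset.sum_eq_single (mt - 1 - rr)]
    · rw [if_pos]
      · congr 1; omega
      · exact ⟨q + 1, by omega⟩
    · intro j hj hne
      have hj' : j < mt := Finset.mem_range.mp hj
      rw [if_neg]
      intro hdvd
      have h2 : mt * q + rr + j + 1 = mt * q + (rr + j + 1) := by omega
      rw [h2] at hdvd
      have h3 : mt ∣ rr + j + 1 := (Nat.dvd_add_right ⟨q, rfl⟩).mp hdvd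
      obtain ⟨t, ht⟩ := h3
      match t with
      | 0 => omega
      | 1 => omega
      | (t + 2) =>
        have : mt * 2 ≤ mt * (t + 2) := Nat.mul_le_mul_left mt (by omega)
        omega
    · intro h
      exact absurd (Finset.mem_range.mpr (by omega)) h

-- box-minimum positions in the descending list, re-indexed into the ascending list
lemma desc_to_asc (a : List Int) (mt q rr : Nat) (hmt : 0 < mt) (hrr : rr < mt)
    (hN : a.length = mt * q + rr) :
    ∑ k ∈ Finset.range q, a.reverse.getD (mt * k + (mt - 1)) 0
      = ∑ k ∈ Finset.range q, a.getD (rr + mt * k) 0 := by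
  rw [← Finset.sum_range_reflect (fun j => a.getD (rr + mt * j) 0) q]
  refine Finset.sum_congr rfl (fun k hk => ?_)
  have hkq : k < q := Finset.mem_range.mp hk
  have hx : mt * (q - 1 - k) + mt * k + mt = mt * q := by
    have h5 : (q - 1 - k) + k + 1 = q := by omega
    calc mt * (q - 1 - k) + mt * k + mt = mt * ((q - 1 - k) + k + 1) := by ring
      _ = mt * q := by rw [h5]
  have hin : mt * k + (mt - 1) < a.reverse.length := by
    rw [List.length_reverse, hN]; omega
  have hin2 : rr + mt * (q - 1 - k) < a.length := by rw [hN]; omega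
  rw [List.getD_eq_getElem _ _ hin, List.getD_eq_getElem _ _ hin2, List.getElem_reverse]
  congr 1
  omega

-- main computation for positive m
lemma main_pos (m : Int) (score : List Int) (hm : 0 < m) :
    solution 0 m score = solution_alt 0 m score := by
  set mt := m.toNat with hmtdef
  have hmt : (mt : Int) = m := Int.toNat_of_nonneg hm.le
  have hmt0 : 0 < mt := by omega
  set asc := PySem.List.sorted score (fun x => x) false with hasc
  have hpa : asc.Pairwise (· ≤ ·) := by
    have := PySem.List.sorted_pairwise (xs := score) (key := fun x => x)
    simpa using this
  set N := asc.length with hN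
  set q := N / mt with hq
  set rr := N % mt with hrr
  have hNq : N = mt * q + rr := (Nat.div_add_mod N mt).symm
  have hrlt : rr < mt := Nat.mod_lt _ hmt0
  -- A's side
  have hA : solution 0 m score = m * ∑ k ∈ Finset.range q, asc.getD (rr + mt * k) 0 := by
    simp only [solution, sorted_desc_eq_reverse_asc, ← hasc]
    exact A_sum asc m hm hpa
  -- B's side
  have hB : solution_alt 0 m score = m * ∑ k ∈ Finset.range q, asc.getD (rr + mt * k) 0 := by
    simp only [solution_alt, PySem.Dict.foldl_insert_getD_add_one_eq_counter,
      PySem.Dict.keys_counter, PySem.Dict.getD_counter]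
    set L := PySem.List.sorted (PySem.Set.ofList score) (fun x => x) true with hLdef
    have hfold := B_fold L (fun v => score.count v) m mt hmt 0 0
    simp only [Nat.cast_zero] at hfold
    rw [hfold]
    have hflat := flat_eq_sorted_desc score
    rw [hLdef] at *
    rw [hflat]
    have hsd : PySem.List.sorted score (fun x => x) true = asc.reverse :=
      sorted_desc_eq_reverse_asc score
    rw [hsd]
    have hlen : asc.reverse.length = mt * q + rr := by
      rw [List.length_reverse, ← hN, hNq]
    rw [hlen]
    have hcond : ∀ i ∈ Finset.range (mt * q + rr),
        (if mt ∣ 0 + i + 1 then asc.reverse.getD i 0 else 0)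
        = (if mt ∣ i + 1 then asc.reverse.getD i 0 else 0) := by
      intro i _
      have : 0 + i + 1 = i + 1 := by omega
      rw [this]
    rw [Finset.sum_congr rfl hcond, sum_dvd_blocks _ mt q rr hmt0 hrlt,
        desc_to_asc asc mt q rr hmt0 hrlt (by omega), zero_add]
  rw [hA, hB]

lemma solution_k_irrel (k m : Int) (score : List Int) :
    solution k m score = solution 0 m score := rfl

lemma solution_alt_k_irrel (k m : Int) (score : List Int) :
    solution_alt k m score = solution_alt 0 m score := rfl

-- ===== VERDICT (by name: the statement is the Claim_ definition above) =====
theorem solution_spec : Claim_equal_solution := by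
  intro k m score _ hpre
  unfold Spec_solution
  rw [solution_k_irrel, solution_alt_k_irrel]
  exact main_pos m score hpre
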